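-- pv_equiv track=rewrite | github.com/pypi-data/pypi-mirror-391 | packages/veri-helix/veri_helix-0.2.0.tar.gz/veri_helix-0.2.0/src/helix/codon.py | _clean_rna
-- ===== SOURCE A (Python) =====
-- def _clean_rna(rna: str) -> str:
--     """Normalize to uppercase RNA alphabet (replace thymine with uracil)."""
--     cleaned: list[str] = []
--     for base in rna.upper():
--         if base in {"\n", "\r", "\t", " "}:
--             continue
--         if base == "-":
--             continue
--         if base == "T":
--             base = "U"
--         if base not in {"A", "U", "G", "C"}:
--             raise ValueError(f"Unexpected base '{base}' in RNA sequence.")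
--         cleaned.append(base)
--     return "".join(cleaned)
-- ===== SOURCE B (Python) =====
-- _RNA_TABLE = str.maketrans({"T": "U", "\n": None, "\r": None, "\t": None, " ": None, "-": None})
--
--
-- def _clean_rna(rna: str) -> str:
--     """Normalize to uppercase RNA alphabet (replace thymine with uracil)."""
--     cleaned = rna.upper().translate(_RNA_TABLE)
--     for base in cleaned:
--         if base not in "AUGC":
--             raise ValueError(f"Unexpected base '{base}' in RNA sequence.")
--     return cleaned
-- ===== Notes on version B (the rewrite author's own statement) =====
-- stated objective: idiomatic
-- what changed: Replaces A's single char-by-char accumulate-and-check loop with a str.translate pass over a precomputed table (T->U, whitespace/dash deleted) followed by a separate validation loop over the cleaned string; Pre_ excludes exactly the inputs where both raise ValueError.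
import Mathlib
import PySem

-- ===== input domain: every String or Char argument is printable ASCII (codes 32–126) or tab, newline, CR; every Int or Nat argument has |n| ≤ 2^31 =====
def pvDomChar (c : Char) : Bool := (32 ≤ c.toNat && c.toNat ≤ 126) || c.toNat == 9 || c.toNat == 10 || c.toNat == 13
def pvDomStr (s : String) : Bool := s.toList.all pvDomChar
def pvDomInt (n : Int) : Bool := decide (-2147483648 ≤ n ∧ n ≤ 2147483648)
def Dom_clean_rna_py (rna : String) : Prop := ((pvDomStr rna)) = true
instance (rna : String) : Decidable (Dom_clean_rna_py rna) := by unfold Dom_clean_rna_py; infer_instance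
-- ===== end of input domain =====

-- B is an idiomatic two-pass version: a translate pass (T->U, whitespace/dash deleted) then a validation loop; return values agree wherever A returns.

-- ===== PORT A =====
-- A's loop: skip whitespace, skip '-', map T->U, raise on a non-AUGC base, append; 'none' marks the raise.
def cleanA : List Char → List Char → Option (List Char)
  | acc, [] => some acc
  | acc, c :: rest =>
    if c = '\n' ∨ c = '\r' ∨ c = '\t' ∨ c = ' ' then cleanA acc rest
    else if c = '-' then cleanA acc rest
    else
      let b := if c = 'T' then 'U' else c
      if b = 'A' ∨ b = 'U' ∨ b = 'G' ∨ b = 'C' then cleanA (acc ++ [b]) rest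
      else none

def clean_rna_py (rna : String) : String :=
  match cleanA [] (PySem.Str.upper rna).toList with
  | some cs => String.ofList cs
  | none => ""          -- unreachable under Pre_ (Python raises ValueError here)

-- ===== PORT B =====
-- the translation table: T->U, whitespace and '-' deleted, everything else kept
def transB (c : Char) : Option Char :=
  if c = '\n' ∨ c = '\r' ∨ c = '\t' ∨ c = ' ' ∨ c = '-' then none
  else if c = 'T' then some 'U' else some c

def clean_rna_py_alt (rna : String) : String :=
  let cleaned := ((PySem.Str.upper rna).toList).filterMap transB
  if cleaned.all (fun b => b = 'A' ∨ b = 'U' ∨ b = 'G' ∨ b = 'C') then String.ofList cleaned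
  else ""               -- unreachable under Pre_ (Python raises ValueError here)

-- ===== PRECONDITION & SPEC =====
-- Pre_ excludes exactly the inputs on which A raises ValueError: a character that is not
-- an RNA/DNA base (either case), whitespace, or '-'.
def Pre_clean_rna_py (rna : String) : Prop :=
  rna.toList.all (fun c => c ∈ ['A','U','G','C','T','a','u','g','c','t','\n','\r','\t',' ','-']) = true
instance (rna : String) : Decidable (Pre_clean_rna_py rna) := by unfold Pre_clean_rna_py; infer_instance
def pvWitness_clean_rna_py : String := "a Cg-U\nT t"

def Spec_clean_rna_py (rna : String) (out : String) : Prop := out = clean_rna_py_alt rna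
instance (rna : String) (out : String) : Decidable (Spec_clean_rna_py rna out) := by unfold Spec_clean_rna_py; infer_instance

-- ===== CLAIM (what is proved, stated in full; the proofs are below) =====
def Claim_equal_clean_rna_py : Prop := ∀ (rna : String), Dom_clean_rna_py rna → Pre_clean_rna_py rna → Spec_clean_rna_py rna (clean_rna_py rna)

-- ===== LEMMAS AND PROOFS =====

-- On an uppercased list consisting of allowed characters, A's fold produces acc ++ B's filterMap.
theorem cleanA_eq_filterMap (l : List Char)
    (h : ∀ c ∈ l, c ∈ (['A','U','G','C','T','\n','\r','\t',' ','-'] : List Char)) :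
    ∀ acc, cleanA acc l = some (acc ++ l.filterMap transB) := by
  induction l with
  | nil => intro acc; simp [cleanA]
  | cons c rest ih =>
    intro acc
    have hc := h c (by simp)
    have hrest : ∀ c ∈ rest, c ∈ (['A','U','G','C','T','\n','\r','\t',' ','-'] : List Char) :=
      fun c hm => h c (by simp [hm])
    fin_cases hc <;> simp [cleanA, transB, ih hrest]

theorem clean_rna_py_spec : Claim_equal_clean_rna_py := by
  intro rna _ hpre
  unfold Spec_clean_rna_py clean_rna_py clean_rna_py_alt
  have hup : ∀ c ∈ (PySem.Str.upper rna).toList,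
      c ∈ (['A','U','G','C','T','\n','\r','\t',' ','-'] : List Char) := by
    simp only [PySem.Str.toList_upper, PySem.Chars.upper, List.mem_map]
    rintro c ⟨d, hd, rfl⟩
    unfold Pre_clean_rna_py at hpre
    rw [List.all_eq_true] at hpre
    have := hpre d hd
    simp only [decide_eq_true_eq] at this
    fin_cases this <;> decide
  rw [cleanA_eq_filterMap _ hup []]
  have hv : ((PySem.Str.upper rna).toList.filterMap transB).all
      (fun b => b = 'A' ∨ b = 'U' ∨ b = 'G' ∨ b = 'C') = true := by
    rw [List.all_eq_true]
    intro b hb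
    rw [List.mem_filterMap] at hb
    obtain ⟨c, hc, hbc⟩ := hb
    have := hup c hc
    fin_cases this <;> simp only [transB] at hbc <;> simp_all <;> subst hbc <;> decide
  rw [if_pos hv]
  simp
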